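-- pv_equiv track=rewrite | github.com/hattmo/projects | adventOfCode/2015/day11_2/solution.py | has_straight
-- ===== SOURCE A (Python) =====
-- def has_straight(test:list):
--     i = 0
--     test_len = len(test)
--     while i < test_len-2:
--         if test[i+2] - test[i+1] == 1 and test[i+1] - test[i] == 1:
--             return True
--         i+=1
--     return False
-- ===== SOURCE B (Python) =====
-- def has_straight(test: list):
--     run = 1
--     for prev, cur in zip(test, test[1:]):
--         if cur - prev == 1:
--             run += 1
--             if run == 3:
--                 return True
--         else:
--             run = 1
--     return False
-- ===== Notes on version B (the rewrite author's own statement) =====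
-- stated objective: alternative
-- what changed: Replaced the index-based scan over independent length-3 windows (three subscripts and two subtractions per position) by a single pass over adjacent pairs that maintains a run-length counter and fires when the run reaches 3.
import Mathlib
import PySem

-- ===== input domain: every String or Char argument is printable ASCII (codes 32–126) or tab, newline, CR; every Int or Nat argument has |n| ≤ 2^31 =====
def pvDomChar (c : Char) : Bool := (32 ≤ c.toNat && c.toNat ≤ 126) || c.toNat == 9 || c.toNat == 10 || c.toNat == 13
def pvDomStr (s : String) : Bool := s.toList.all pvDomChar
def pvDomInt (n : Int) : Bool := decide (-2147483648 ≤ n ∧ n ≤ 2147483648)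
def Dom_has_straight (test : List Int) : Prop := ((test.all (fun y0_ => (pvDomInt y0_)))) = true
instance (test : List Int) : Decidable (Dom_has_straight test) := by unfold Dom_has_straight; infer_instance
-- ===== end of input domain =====

-- B replaces A's scan of independent length-3 windows by one pass over adjacent
-- pairs maintaining a run-length counter (objective: alternative decomposition).


-- ===== PORT A =====
-- A's while loop over index i (indices i, i+1, i+2 are always in range, so
-- List.getD is exact here); recursion on test_len - i mirrors 'i += 1'.
def hasStraightGoA (test : List Int) (i : Nat) : Bool :=
  if _h : i < test.length - 2 then
    if test.getD (i+2) 0 - test.getD (i+1) 0 == 1 && test.getD (i+1) 0 - test.getD i 0 == 1 then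
      true
    else
      hasStraightGoA test (i+1)
  else
    false
termination_by test.length - i

def has_straight (test : List Int) : Bool := hasStraightGoA test 0

-- ===== PORT B =====
-- B's single pass over adjacent pairs with the running counter 'run'.
def hasStraightGoB (prev : Int) (run : Nat) : List Int → Bool
  | [] => false
  | cur :: rest =>
      if cur - prev == 1 then
        if run + 1 == 3 then true else hasStraightGoB cur (run + 1) rest
      else
        hasStraightGoB cur 1 rest

def has_straight_alt (test : List Int) : Bool :=
  match test with
  | [] => false
  | x :: rest => hasStraightGoB x 1 rest

-- ===== PRECONDITION & SPEC =====
def Spec_has_straight (test : List Int) (out : Bool) : Prop := out = has_straight_alt test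
instance (test : List Int) (out : Bool) : Decidable (Spec_has_straight test out) := by unfold Spec_has_straight; infer_instance

-- ===== CLAIM (what is proved, stated in full; the proofs are below) =====
def Claim_equal_has_straight : Prop := ∀ (test : List Int), Dom_has_straight test → Spec_has_straight test (has_straight test)

-- ===== LEMMAS AND PROOFS =====

/-- Reference predicate: some three consecutive elements increase by 1 each. -/
def straight3 : List Int → Bool
  | a :: b :: c :: rest => (c - b == 1 && b - a == 1) || straight3 (b :: c :: rest)
  | _ => false

theorem straight3_short (l : List Int) (h : l.length < 3) : straight3 l = false := by
  match l with
  | [] => rfl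
  | [_] => rfl
  | [_, _] => rfl
  | _ :: _ :: _ :: _ => simp at h; omega

theorem straight3_cons_of_ne (p c : Int) (t : List Int) (h : (c - p == 1) = false) :
    straight3 (p :: c :: t) = straight3 (c :: t) := by
  match t with
  | [] => simp [straight3]
  | d :: u => simp [straight3, h]

theorem goB_spec (rest : List Int) :
    (∀ p : Int, hasStraightGoB p 1 rest = straight3 (p :: rest)) ∧
    (∀ p : Int, hasStraightGoB p 2 rest = straight3 ((p - 1) :: p :: rest)) := by
  induction rest with
  | nil => exact ⟨fun p => rfl, fun p => rfl⟩
  | cons c t ih =>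
    refine ⟨fun p => ?_, fun p => ?_⟩
    · by_cases h : (c - p == 1) = true
      · simp only [hasStraightGoB, h, if_true]
        rw [show (1+1 == 3) = false from rfl]
        simp only [if_false, Bool.false_eq_true]
        rw [ih.2 c]
        have hc : c - 1 = p := by
          have := of_decide_eq_true h; omega
        rw [hc]
      · have h' : (c - p == 1) = false := by simpa using h
        simp only [hasStraightGoB, h', if_false, Bool.false_eq_true]
        rw [ih.1 c, straight3_cons_of_ne p c t h']
    · by_cases h : (c - p == 1) = true
      · simp only [hasStraightGoB, h, if_true]
        rw [show (2+1 == 3) = true from rfl]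
        simp only [if_true]
        have hp : (p - (p - 1) == 1) = true := by simp
        simp [straight3, h]
      · have h' : (c - p == 1) = false := by simpa using h
        simp only [hasStraightGoB, h', if_false, Bool.false_eq_true]
        rw [ih.1 c]
        have hp : straight3 ((p-1) :: p :: c :: t) = straight3 (p :: c :: t) := by
          simp [straight3, h']
        rw [hp, straight3_cons_of_ne p c t h']

theorem goA_spec (test : List Int) (i : Nat) :
    hasStraightGoA test i = straight3 (test.drop i) := by
  induction hn : test.length - i using Nat.strong_induction_on generalizing i with
  | _ n ih =>
  by_cases h : i < test.length - 2
  · have h0 : i < test.length := by omega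
    have h1 : i + 1 < test.length := by omega
    have h2 : i + 2 < test.length := by omega
    have hd : test.drop i = test[i] :: test[i+1] :: test[i+2] :: test.drop (i+3) := by
      rw [List.drop_eq_getElem_cons h0, List.drop_eq_getElem_cons h1,
          List.drop_eq_getElem_cons h2]
    have hd1 : test.drop (i+1) = test[i+1] :: test[i+2] :: test.drop (i+3) := by
      rw [List.drop_eq_getElem_cons h1, List.drop_eq_getElem_cons h2]
    rw [hasStraightGoA]
    simp only [h, dif_pos]
    rw [List.getD_eq_getElem _ _ h0, List.getD_eq_getElem _ _ h1, List.getD_eq_getElem _ _ h2]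
    rw [hd, straight3, ← hd1]
    by_cases hc : (test[i+2] - test[i+1] == 1 && test[i+1] - test[i] == 1) = true
    · simp [hc]
    · have hc' := eq_false_of_ne_true hc
      rw [hc', if_neg (by simp), Bool.false_or]
      exact ih (test.length - (i+1)) (by omega) (i+1) rfl
  · rw [hasStraightGoA]
    simp only [h, dif_neg, not_false_eq_true]
    rw [straight3_short _ (by simp; omega)]

theorem alt_eq_straight3 (test : List Int) : has_straight_alt test = straight3 test := by
  match test with
  | [] => rfl
  | x :: rest => exact (goB_spec rest).1 x

-- ===== VERDICT (by name: the statement is the Claim_ definition above) =====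
theorem has_straight_spec : Claim_equal_has_straight := by
  intro test _
  unfold Spec_has_straight has_straight
  rw [alt_eq_straight3, goA_spec test 0, List.drop_zero]
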